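-- pv_equiv track=rewrite | github.com/gaixen/Graph-Neural-Network | build_from_scratch/graph/graph.py | is_simple_graph
-- ===== SOURCE A (Python) =====
-- from typing import Any, Dict, List, Set, Tuple, Optional, Hashable, Generic, TypeVar
--
-- def is_simple_graph(edges: List[Tuple[Any, Any]], allow_self_loops: bool = False) -> bool:
--     """Check if graph is simple (no multi-edges, optionally no self-loops).
--
--     Parameters:
--         edges: List of edges
--         allow_self_loops: If False, self-loops violate simplicity
--
--     Returns:
--         True if graph is simple
--     """
--     seen = set()
--     for u, v in edges:
--         if (u, v) in seen:
--             return False  # Duplicate edge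
--         seen.add((u, v))
--
--         if not allow_self_loops and u == v:
--             return False  # Self-loop
--
--     return True
-- ===== SOURCE B (Python) =====
-- def is_simple_graph(edges, allow_self_loops=False):
--     """Sort-then-scan: after sorting, duplicate edges are adjacent."""
--     srt = sorted(edges)
--     if any(a == b for a, b in zip(srt, srt[1:])):
--         return False  # duplicate edge found next to its twin
--     return allow_self_loops or all(u != v for u, v in edges)
-- ===== Notes on version B (the rewrite author's own statement) =====
-- stated objective: alternative
-- what changed: Duplicate detection is done by sorting the edge list and scanning adjacent pairs for equality (no set, no incremental membership test), followed by a separate whole-list self-loop pass.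
import Mathlib
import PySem

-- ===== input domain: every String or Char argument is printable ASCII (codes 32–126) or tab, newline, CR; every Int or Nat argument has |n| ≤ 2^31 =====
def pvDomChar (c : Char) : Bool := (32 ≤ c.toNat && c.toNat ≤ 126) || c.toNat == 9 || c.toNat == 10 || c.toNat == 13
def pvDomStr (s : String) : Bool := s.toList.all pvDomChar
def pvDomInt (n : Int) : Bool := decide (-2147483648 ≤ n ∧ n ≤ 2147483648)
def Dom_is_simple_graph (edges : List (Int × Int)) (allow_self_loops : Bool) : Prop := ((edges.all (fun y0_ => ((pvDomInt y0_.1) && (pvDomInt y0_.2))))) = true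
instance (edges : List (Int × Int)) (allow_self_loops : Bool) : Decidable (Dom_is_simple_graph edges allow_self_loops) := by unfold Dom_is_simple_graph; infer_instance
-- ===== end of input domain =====

-- B replaces A's incremental seen-set loop by a sort-then-adjacent-scan for duplicate
-- edges plus a separate whole-list self-loop pass (alternative algorithm, not claimed faster).


-- ===== PORT A =====
-- the 'for u, v in edges' loop carrying the mutable set 'seen'
def pvLoopA (allow : Bool) (seen : PySem.Set (Int × Int)) : List (Int × Int) → Bool
  | [] => true                                            -- 'return True'
  | (u, v) :: rest =>
    if PySem.Set.contains seen (u, v) then false          -- 'if (u, v) in seen: return False'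
    else
      -- 'seen.add((u, v))' then 'if not allow_self_loops and u == v: return False'
      if (!allow) && (u == v) then false
      else pvLoopA allow (PySem.Set.add seen (u, v)) rest

def is_simple_graph (edges : List (Int × Int)) (allow_self_loops : Bool) : Bool :=
  pvLoopA allow_self_loops PySem.Set.empty edges

-- ===== PORT B =====
-- Python's tuple comparison: lexicographic order on (Int × Int)
abbrev pvLexLe (a b : Int × Int) : Prop := a.1 < b.1 ∨ (a.1 = b.1 ∧ a.2 ≤ b.2)

-- 'any(a == b for a, b in zip(srt, srt[1:]))': scan adjacent pairs for equality
def pvAdjDup : List (Int × Int) → Bool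
  | a :: b :: t => (a == b) || pvAdjDup (b :: t)
  | _ => false

def is_simple_graph_alt (edges : List (Int × Int)) (allow_self_loops : Bool) : Bool :=
  -- 'srt = sorted(edges)' — Python sorts tuples lexicographically; ported as the
  -- corresponding Mathlib sort under the lexicographic order
  if pvAdjDup (List.insertionSort pvLexLe edges) then false
  else allow_self_loops || edges.all (fun e => e.1 != e.2)

-- ===== PRECONDITION & SPEC =====
def Spec_is_simple_graph (edges : List (Int × Int)) (allow_self_loops : Bool) (out : Bool) : Prop := out = is_simple_graph_alt edges allow_self_loops
instance (edges : List (Int × Int)) (allow_self_loops : Bool) (out : Bool) : Decidable (Spec_is_simple_graph edges allow_self_loops out) := by unfold Spec_is_simple_graph; infer_instance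

-- ===== CLAIM (what is proved, stated in full; the proofs are below) =====
def Claim_equal_is_simple_graph : Prop := ∀ (edges : List (Int × Int)) (allow_self_loops : Bool), Dom_is_simple_graph edges allow_self_loops → Spec_is_simple_graph edges allow_self_loops (is_simple_graph edges allow_self_loops)

-- ===== LEMMAS AND PROOFS =====

-- A's loop succeeds iff: no edge repeats, no edge is already in 'seen', and (allow or no self-loop).
lemma pvLoopA_eq_true_iff (allow : Bool) (l : List (Int × Int)) :
    ∀ seen : PySem.Set (Int × Int),
      pvLoopA allow seen l = true ↔
        (l.Nodup ∧ (∀ e ∈ l, e ∉ seen) ∧ (allow = true ∨ ∀ e ∈ l, e.1 ≠ e.2)) := by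
  induction l with
  | nil => intro seen; simp [pvLoopA]
  | cons e rest ih =>
    intro seen
    obtain ⟨u, v⟩ := e
    rw [pvLoopA]
    split_ifs with h1 h2
    · have hmem : (u, v) ∈ seen := by simpa using h1
      simp only [false_iff, not_and]
      rintro - hf
      exact absurd hmem (by simpa using hf (u, v) (by simp))
    · simp only [Bool.and_eq_true, Bool.not_eq_eq_eq_not, Bool.not_true, beq_iff_eq] at h2
      simp only [false_iff, not_and]
      rintro - - hl
      rcases hl with ha | hns
      · simp [ha] at h2
      · exact (hns (u, v) (by simp)) h2.2
    · have hmem : (u, v) ∉ seen := by simpa using h1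
      have hsl : allow = true ∨ u ≠ v := by
        rcases Bool.eq_false_or_eq_true allow with ha | ha
        · exact Or.inl ha
        · exact Or.inr fun hv => h2 (by simp [ha, hv])
      rw [ih]
      simp only [List.nodup_cons, List.mem_cons, PySem.Set.mem_add, not_or]
      constructor
      · rintro ⟨hnd, hf, hl⟩
        refine ⟨⟨fun hin => (hf _ hin).2 rfl, hnd⟩, ?_, ?_⟩
        · rintro f (rfl | hf')
          · exact hmem
          · exact (hf f hf').1
        · rcases hl with ha | hns
          · exact Or.inl ha
          · rcases hsl with ha | hne
            · exact Or.inl ha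
            · refine Or.inr ?_
              rintro f (rfl | hf')
              · exact hne
              · exact hns f hf'
      · rintro ⟨⟨hni, hnd⟩, hf, hl⟩
        refine ⟨hnd, ?_, ?_⟩
        · intro f hf'
          exact ⟨hf f (Or.inr hf'), fun hfe => hni (hfe ▸ hf')⟩
        · rcases hl with ha | hns
          · exact Or.inl ha
          · exact Or.inr fun f hf' => hns f (Or.inr hf')

-- pvLexLe is antisymmetric
lemma pvLexLe_antisymm {a b : Int × Int} (h1 : pvLexLe a b) (h2 : pvLexLe b a) : a = b := by
  obtain ⟨a1, a2⟩ := a; obtain ⟨b1, b2⟩ := b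
  rcases h1 with h | ⟨he, hle⟩ <;> rcases h2 with h' | ⟨he', hle'⟩ <;>
    simp_all <;> omega

-- pvLexLe is total
lemma pvLexLe_total (a b : Int × Int) : pvLexLe a b ∨ pvLexLe b a := by
  unfold pvLexLe; omega

-- pvLexLe is transitive
lemma pvLexLe_trans {a b c : Int × Int} (h1 : pvLexLe a b) (h2 : pvLexLe b c) : pvLexLe a c := by
  unfold pvLexLe at *; omega

-- on a list pairwise-ordered by pvLexLe, no adjacent duplicates ↔ no duplicates at all
lemma pvAdjDup_eq_false_iff (l : List (Int × Int)) (hs : l.Pairwise pvLexLe) :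
    pvAdjDup l = false ↔ l.Nodup := by
  match l with
  | [] => simp [pvAdjDup]
  | [a] => simp [pvAdjDup]
  | a :: b :: t =>
    rw [pvAdjDup]
    rcases List.pairwise_cons.mp hs with ⟨hab, hs'⟩
    rcases List.pairwise_cons.mp hs' with ⟨hbt, -⟩
    by_cases hEq : a = b
    · subst hEq
      simp [List.nodup_cons]
    · have ih := pvAdjDup_eq_false_iff (b :: t) hs'
      simp only [beq_eq_false_iff_ne (a := a) (b := b), Bool.or_eq_false_iff]
      constructor
      · rintro ⟨-, hrest⟩
        have hnd : (b :: t).Nodup := ih.mp hrest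
        refine List.nodup_cons.mpr ⟨?_, hnd⟩
        intro hmem
        rcases List.mem_cons.mp hmem with h' | hat
        · exact hEq h'
        · -- a ∈ t: then pvLexLe b a (from hbt) and pvLexLe a b (hab) force a = b
          exact hEq (pvLexLe_antisymm (hab b (by simp)) (hbt a hat))
      · intro hnd
        rcases List.nodup_cons.mp hnd with ⟨-, hnd'⟩
        exact ⟨fun h => hEq h, ih.mpr hnd'⟩

-- B succeeds iff: no duplicate edge and (allow or no self-loop)
lemma alt_eq_true_iff (edges : List (Int × Int)) (allow : Bool) :
    is_simple_graph_alt edges allow = true ↔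
      (edges.Nodup ∧ (allow = true ∨ ∀ e ∈ edges, e.1 ≠ e.2)) := by
  unfold is_simple_graph_alt
  have hperm : (List.insertionSort pvLexLe edges).Perm edges := List.perm_insertionSort _ _
  have hsorted : (List.insertionSort pvLexLe edges).Pairwise pvLexLe := by
    haveI : Std.Total pvLexLe := ⟨pvLexLe_total⟩
    haveI : IsTrans (Int × Int) pvLexLe := ⟨fun _ _ _ => pvLexLe_trans⟩
    exact List.pairwise_insertionSort pvLexLe edges
  have hadj := pvAdjDup_eq_false_iff _ hsorted
  rw [hperm.nodup_iff] at hadj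
  split_ifs with h
  · simp only [false_iff, not_and]
    intro hnd
    rw [← hadj] at hnd
    simp [h] at hnd
  · have hnd : edges.Nodup := hadj.mp (by simpa using h)
    simp only [Bool.or_eq_true, List.all_eq_true, bne_iff_ne, ne_eq]
    tauto

theorem is_simple_graph_eq (edges : List (Int × Int)) (allow : Bool) :
    is_simple_graph edges allow = is_simple_graph_alt edges allow := by
  rw [Bool.eq_iff_iff, is_simple_graph, pvLoopA_eq_true_iff, alt_eq_true_iff]
  simp only [PySem.Set.empty]
  constructor
  · rintro ⟨h1, -, h3⟩; exact ⟨h1, h3⟩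
  · rintro ⟨h1, h3⟩
    refine ⟨h1, ?_, h3⟩
    intro e _; simp

-- ===== VERDICT (by name: the statement is the Claim_ definition above) =====
theorem is_simple_graph_spec : Claim_equal_is_simple_graph := by
  intro edges allow _
  unfold Spec_is_simple_graph
  exact is_simple_graph_eq edges allow
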